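-- pv_equiv track=rewrite | github.com/pienaahj/telectro-helpdesk-poc | apps/telephony/telephony/scripts/repair_kmz_location_names.py | _norm_path
-- ===== SOURCE A (Python) =====
-- def _norm_path(p: str) -> str:
--     """Normalize folder paths and remove adjacent duplicates."""
--     if not p:
--         return ""
--     parts = [x.strip() for x in p.split("/") if x.strip()]
--     out = []
--     for x in parts:
--         if not out or out[-1] != x:
--             out.append(x)
--     return " / ".join(out)
-- ===== SOURCE B (Python) =====
-- def _norm_path(p: str) -> str:
--     parts = [x.strip() for x in p.split("/") if x.strip()]
--
--     def dedup(xs):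
--         if len(xs) < 2:
--             return xs
--         if xs[0] == xs[1]:
--             return dedup(xs[1:])
--         return [xs[0]] + dedup(xs[1:])
--
--     return " / ".join(dedup(parts))
-- ===== Notes on version B (the rewrite author's own statement) =====
-- stated objective: alternative
-- what changed: Replaces the accumulator loop comparing out[-1] (and the redundant empty-string guard) with a structural recursion that compares each element to its successor and recurses on the tail, building the result front-to-back.
import Mathlib
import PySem

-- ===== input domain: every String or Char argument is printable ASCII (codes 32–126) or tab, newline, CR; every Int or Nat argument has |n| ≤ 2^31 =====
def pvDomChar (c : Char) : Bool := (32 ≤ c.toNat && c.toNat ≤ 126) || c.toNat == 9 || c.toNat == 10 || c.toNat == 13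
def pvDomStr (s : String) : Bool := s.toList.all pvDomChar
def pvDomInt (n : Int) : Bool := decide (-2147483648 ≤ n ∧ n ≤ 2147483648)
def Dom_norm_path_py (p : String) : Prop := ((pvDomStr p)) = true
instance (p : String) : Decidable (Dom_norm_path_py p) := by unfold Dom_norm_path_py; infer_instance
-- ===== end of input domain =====

-- B replaces A's accumulator loop (and its redundant empty-string guard) with a
-- structural recursion comparing each element to its successor; return values proved equal on Dom.

-- ===== PORT A =====
def norm_path_py (p : String) : String :=
  if p = "" then ""
  else
    let parts := (((PySem.Str.split? p "/").getD []).filter (fun x => PySem.Str.strip x ≠ "")).map PySem.Str.strip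
    let out := parts.foldl (fun out x => if out = [] ∨ out.getLast? ≠ some x then out ++ [x] else out) []
    PySem.Str.join " / " out

-- ===== PORT B =====
/-- B's recursive helper `dedup`: keep the head unless it equals its successor, recurse on the tail. -/
def dedupB : List String → List String
  | [] => []
  | [x] => [x]
  | x :: y :: xs => if x = y then dedupB (y :: xs) else x :: dedupB (y :: xs)

def norm_path_py_alt (p : String) : String :=
  let parts := (((PySem.Str.split? p "/").getD []).filter (fun x => PySem.Str.strip x ≠ "")).map PySem.Str.strip
  PySem.Str.join " / " (dedupB parts)

-- ===== PRECONDITION & SPEC =====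
def Spec_norm_path_py (p : String) (out : String) : Prop := out = norm_path_py_alt p
instance (p : String) (out : String) : Decidable (Spec_norm_path_py p out) := by unfold Spec_norm_path_py; infer_instance

-- ===== CLAIM (what is proved, stated in full; the proofs are below) =====
def Claim_equal_norm_path_py : Prop := ∀ (p : String), Dom_norm_path_py p → Spec_norm_path_py p (norm_path_py p)

-- ===== LEMMAS AND PROOFS =====

/-- canonical adjacent-dedup, parametrised by the previously kept element -/
def dedupAdj (last : Option String) : List String → List String
  | [] => []
  | x :: xs => if last = some x then dedupAdj last xs else x :: dedupAdj (some x) xs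

lemma foldl_eq_dedupAdj (l acc : List String) :
    l.foldl (fun out x => if out = [] ∨ out.getLast? ≠ some x then out ++ [x] else out) acc
      = acc ++ dedupAdj acc.getLast? l := by
  induction l generalizing acc with
  | nil => simp [dedupAdj]
  | cons x xs ih =>
    by_cases h : acc.getLast? = some x
    · have hne : acc ≠ [] := by intro he; simp [he] at h
      simp [List.foldl, h, hne, ih, dedupAdj]
    · simp [List.foldl, h, ih, dedupAdj]

lemma dedupB_cons (x : String) (xs : List String) :
    dedupB (x :: xs) = x :: dedupAdj (some x) xs := by
  induction xs generalizing x with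
  | nil => simp [dedupB, dedupAdj]
  | cons y ys ih =>
    by_cases h : x = y
    · subst h
      simp [dedupB, dedupAdj, ih]
    · simp [dedupB, dedupAdj, h, ih]

lemma dedupB_eq_dedupAdj (l : List String) : dedupB l = dedupAdj none l := by
  cases l with
  | nil => rfl
  | cons x xs => simp [dedupB_cons, dedupAdj]

-- ===== VERDICT (by name: the statement is the Claim_ definition above) =====
theorem norm_path_py_spec : Claim_equal_norm_path_py := by
  intro p _
  show norm_path_py p = norm_path_py_alt p
  by_cases hp : p = ""
  · subst hp; decide
  · simp only [norm_path_py, norm_path_py_alt, if_neg hp]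
    have hA := foldl_eq_dedupAdj
      ((((PySem.Str.split? p "/").getD []).filter (fun x => PySem.Str.strip x ≠ "")).map PySem.Str.strip) []
    simp only [List.nil_append, List.getLast?_nil] at hA
    rw [hA, dedupB_eq_dedupAdj]
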